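-- pv_equiv track=rewrite | github.com/magicmaxmagic/sapiens_reco | backend/app/services/input_security_service.py | sanitize_string_list
-- ===== SOURCE A (Python) =====
-- import unicodedata
--
-- def normalize_untrusted_text(value: str, max_length: int = 20_000) -> str:
--     normalized = unicodedata.normalize("NFKC", value)
--     safe_chars = []
--     for char in normalized:
--         code = ord(char)
--         if char in {"\n", "\t", "\r"} or code >= 32:
--             safe_chars.append(char)
--
--     compact = "".join(safe_chars).strip()
--     return compact[:max_length]
--
-- def sanitize_label(value: str, max_length: int = 255) -> str:
--     return normalize_untrusted_text(value.replace("\n", " "), max_length=max_length)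
--
-- def sanitize_string_list(
--     items: list[str],
--     max_items: int = 30,
--     max_length: int = 64,
-- ) -> list[str]:
--     cleaned: list[str] = []
--     for item in items:
--         normalized = sanitize_label(item, max_length=max_length)
--         if normalized:
--             cleaned.append(normalized)
--     # preserve order while deduplicating
--     seen: set[str] = set()
--     result: list[str] = []
--     for value in cleaned:
--         lowered = value.lower()
--         if lowered in seen:
--             continue
--         seen.add(lowered)
--         result.append(value)
--         if len(result) >= max_items:
--             break
--     return result
-- ===== SOURCE B (Python) =====
-- import unicodedata
--
-- def sanitize_label(value: str, max_length: int = 255) -> str: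
--     text = unicodedata.normalize("NFKC", value.replace("\n", " "))
--     kept = "".join(c for c in text if c in "\n\t\r" or ord(c) >= 32)
--     return kept.strip()[:max_length]
--
-- def sanitize_string_list(
--     items: list[str],
--     max_items: int = 30,
--     max_length: int = 64,
-- ) -> list[str]:
--     # single pass: an insertion-ordered dict does sanitize + dedup + cap at once
--     out: dict[str, str] = {}
--     for item in items:
--         normalized = sanitize_label(item, max_length=max_length)
--         if not normalized:
--             continue
--         lowered = normalized.lower()
--         if lowered not in out:
--             out[lowered] = normalized
--             if len(out) >= max_items:
--                 break
--     return list(out.values())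
-- ===== Notes on version B (the rewrite author's own statement) =====
-- stated objective: simpler
-- what changed: Replaces A's two passes (build a cleaned list, then dedup with a seen-set plus a result list) by a single pass over items that sanitizes, dedups and caps at once using one insertion-ordered dict keyed by the lowercased label, returning its values.
import Mathlib
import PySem

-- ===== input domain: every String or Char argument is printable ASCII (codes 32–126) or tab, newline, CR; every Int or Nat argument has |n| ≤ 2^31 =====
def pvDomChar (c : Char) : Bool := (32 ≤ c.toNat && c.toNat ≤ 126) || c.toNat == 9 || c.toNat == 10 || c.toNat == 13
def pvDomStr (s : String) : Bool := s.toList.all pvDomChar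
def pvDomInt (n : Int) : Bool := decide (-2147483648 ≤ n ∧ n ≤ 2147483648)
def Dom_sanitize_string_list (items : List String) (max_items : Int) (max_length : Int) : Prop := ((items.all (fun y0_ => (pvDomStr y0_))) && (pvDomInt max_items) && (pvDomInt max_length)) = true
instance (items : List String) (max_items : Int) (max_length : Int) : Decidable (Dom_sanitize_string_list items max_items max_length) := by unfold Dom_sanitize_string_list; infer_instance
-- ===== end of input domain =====

-- B fuses A's two passes (sanitize-all, then dedup with seen-set + result list) into one pass
-- over items with a single insertion-ordered dict; objective: simpler.

-- ===== PORT A =====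
-- unicodedata.normalize("NFKC", ·) is the identity on the printable-ASCII/tab/newline/CR domain
-- the claims quantify over, so it is ported as the identity (exact on Dom_sanitize_string_list).
def normalize_untrusted_text (value : String) (max_length : Int) : String :=
  let normalized := value
  let safe_chars := normalized.toList.foldl
    (fun safe_chars char =>
      if char == '\n' || char == '\t' || char == '\r' || decide (32 ≤ char.toNat)
      then safe_chars ++ [char] else safe_chars) []
  let compact := PySem.Str.strip (String.ofList safe_chars)
  PySem.Str.slice compact none (some max_length)

def sanitize_label (value : String) (max_length : Int) : String :=
  normalize_untrusted_text (PySem.Str.replace value "\n" " ") max_length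

-- the second loop of A ('for value in cleaned: … break'), as structural recursion
def dedupLoopA (max_items : Int) : PySem.Set String → List String → List String → List String
  | _, result, [] => result
  | seen, result, value :: rest =>
    let lowered := PySem.Str.lower value
    if PySem.Set.contains seen lowered then
      dedupLoopA max_items seen result rest
    else
      let seen' := PySem.Set.add seen lowered
      let result' := result ++ [value]
      if max_items ≤ (result'.length : Int) then result'
      else dedupLoopA max_items seen' result' rest

def sanitize_string_list (items : List String) (max_items : Int) (max_length : Int) : List String :=
  let cleaned := items.foldl
    (fun cleaned item =>
      let normalized := sanitize_label item max_length
      if normalized = "" then cleaned else cleaned ++ [normalized]) []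
  dedupLoopA max_items (PySem.Set.ofList []) [] cleaned

-- ===== PORT B =====
-- same identity port of unicodedata.normalize("NFKC", ·), exact on Dom_sanitize_string_list
def sanitize_label_alt (value : String) (max_length : Int) : String :=
  let text := PySem.Str.replace value "\n" " "
  let kept := String.ofList (text.toList.filter
    (fun c => c == '\n' || c == '\t' || c == '\r' || decide (32 ≤ c.toNat)))
  PySem.Str.slice (PySem.Str.strip kept) none (some max_length)

-- B's single 'for item in items: … break' loop over one dict
def fusedLoopB (max_items max_length : Int) : PySem.Dict String String → List String → PySem.Dict String String
  | out, [] => out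
  | out, item :: rest =>
    let normalized := sanitize_label_alt item max_length
    if normalized = "" then fusedLoopB max_items max_length out rest
    else
      let lowered := PySem.Str.lower normalized
      if out.contains lowered then fusedLoopB max_items max_length out rest
      else
        let out' := out.insert lowered normalized
        if max_items ≤ (out'.size : Int) then out'
        else fusedLoopB max_items max_length out' rest

def sanitize_string_list_alt (items : List String) (max_items : Int) (max_length : Int) : List String :=
  (fusedLoopB max_items max_length PySem.Dict.empty items).values

-- ===== PRECONDITION & SPEC =====
def Spec_sanitize_string_list (items : List String) (max_items : Int) (max_length : Int) (out : List String) : Prop := out = sanitize_string_list_alt items max_items max_length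
instance (items : List String) (max_items : Int) (max_length : Int) (out : List String) : Decidable (Spec_sanitize_string_list items max_items max_length out) := by unfold Spec_sanitize_string_list; infer_instance

-- ===== CLAIM (what is proved, stated in full; the proofs are below) =====
def Claim_equal_sanitize_string_list : Prop := ∀ (items : List String) (max_items : Int) (max_length : Int), Dom_sanitize_string_list items max_items max_length → Spec_sanitize_string_list items max_items max_length (sanitize_string_list items max_items max_length)

-- ===== LEMMAS AND PROOFS =====

-- A's per-item sanitizer equals B's (foldl-append vs filter over the same predicate)
lemma label_eq (value : String) (max_length : Int) :
    sanitize_label value max_length = sanitize_label_alt value max_length := by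
  unfold sanitize_label sanitize_label_alt normalize_untrusted_text
  simp only [PySem.List.foldl_append_if]
  simp

-- A's first loop builds, in front-to-back order, the nonempty sanitized labels
lemma cleanA_eq (max_length : Int) : ∀ (items : List String) (acc : List String),
    items.foldl
      (fun cleaned item =>
        if sanitize_label item max_length = "" then cleaned
        else cleaned ++ [sanitize_label item max_length]) acc
    = acc ++ items.filterMap
        (fun item =>
          if sanitize_label_alt item max_length = "" then none
          else some (sanitize_label_alt item max_length)) := by
  intro items
  induction items with
  | nil => intro acc; simp
  | cons item rest ih =>
    intro acc
    rw [List.foldl_cons]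
    by_cases h : sanitize_label item max_length = ""
    · have h' : sanitize_label_alt item max_length = "" := by rw [← label_eq]; exact h
      rw [if_pos h, List.filterMap_cons_none (by simp [h'])]
      exact ih acc
    · have h' : ¬ sanitize_label_alt item max_length = "" := by rw [← label_eq]; exact h
      rw [if_neg h, ih, label_eq]
      simp [h']

-- the fused dict loop computes exactly A's dedup loop, under the seen-set ↔ dict-keys invariant
set_option maxHeartbeats 1000000 in
lemma fuse (max_items max_length : Int) : ∀ (items : List String)
    (seen : PySem.Set String) (out : PySem.Dict String String),
    (∀ x, PySem.Set.contains seen x = out.contains x) →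
    out.keys.Nodup →
    dedupLoopA max_items seen out.values
      (items.filterMap
        (fun item =>
          if sanitize_label_alt item max_length = "" then none
          else some (sanitize_label_alt item max_length)))
    = (fusedLoopB max_items max_length out items).values := by
  intro items
  induction items with
  | nil => intro seen out _ _; simp [dedupLoopA, fusedLoopB]
  | cons item rest ih =>
    intro seen out hc hnd
    simp only [List.filterMap_cons, fusedLoopB]
    by_cases h0 : sanitize_label_alt item max_length = ""
    · simp only [h0, ite_true]
      exact ih seen out hc hnd
    · simp only [if_neg h0]
      set n := sanitize_label_alt item max_length with hn
      simp only [dedupLoopA, hc]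
      set L := PySem.Str.lower n with hL
      by_cases hmem : out.contains L
      · simp only [hmem, ite_true]
        exact ih seen out hc hnd
      · have hmem' : out.contains L = false := by simpa using hmem
        have hitems : (out.insert L n).items = out.items ++ [(L, n)] :=
          PySem.Dict.items_insert_of_not_contains out n hmem'
        have hvals : (out.insert L n).values = out.values ++ [n] := by
          simp [PySem.Dict.values, hitems]
        have hsize : (((out.insert L n).size : Nat) : Int)
            = (((out.values ++ [n]).length : Nat) : Int) := by
          simp [PySem.Dict.size, PySem.Dict.values, hitems]
        simp only [hmem', Bool.false_eq_true, ite_false]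
        by_cases hcap : max_items ≤ (((out.values ++ [n]).length : Nat) : Int)
        · have hcap' : max_items ≤ (((out.insert L n).size : Nat) : Int) := by
            rw [hsize]; exact hcap
          rw [if_pos hcap, if_pos hcap']
          exact hvals.symm
        · have hcap' : ¬ max_items ≤ (((out.insert L n).size : Nat) : Int) := by
            rw [hsize]; exact hcap
          rw [if_neg hcap, if_neg hcap']
          have hinv : ∀ x, PySem.Set.contains (PySem.Set.add seen L) x
              = (out.insert L n).contains x := by
            intro x
            have hiff : x ∈ seen ↔ out.contains x = true := by
              rw [← PySem.Set.contains_iff, hc x]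
            rw [Bool.eq_iff_iff, PySem.Set.contains_iff, PySem.Set.mem_add,
                PySem.Dict.contains_insert, Bool.or_eq_true, beq_iff_eq, hiff]
            exact Or.comm
          have hnd' : (out.insert L n).keys.Nodup :=
            PySem.Dict.nodup_keys_insert out L n hnd
          have := ih (PySem.Set.add seen L) (out.insert L n) hinv hnd'
          rw [hvals] at this
          exact this

-- ===== VERDICT (by name: the statement is the Claim_ definition above) =====
theorem sanitize_string_list_spec : Claim_equal_sanitize_string_list := by
  intro items max_items max_length _
  unfold Spec_sanitize_string_list sanitize_string_list sanitize_string_list_alt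
  show dedupLoopA max_items (PySem.Set.ofList []) []
      (items.foldl
        (fun cleaned item =>
          if sanitize_label item max_length = "" then cleaned
          else cleaned ++ [sanitize_label item max_length]) [])
    = (fusedLoopB max_items max_length PySem.Dict.empty items).values
  rw [cleanA_eq]
  have := fuse max_items max_length items (PySem.Set.ofList [])
    PySem.Dict.empty
    (by intro x; simp [PySem.Set.contains, PySem.Set.ofList, PySem.Dict.contains_empty])
    (by simp [PySem.Dict.keys_empty])
  simpa [PySem.Dict.values, PySem.Dict.empty] using this
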